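/- PORTED by tools/port_fixed.py from Prog/Jsmn/D/Main.lean to THE FIXED IMAGE fixed/jsmn_d.bin (same bytes at the same addresses; binFD). Do not edit: edit the original and port again. -/
/-
  jsmn_d.bin: `jsmn_main` (38 bytes at 1005ABH, 14 instructions, one call): `tokens = out + 4; r = jsmn_run(js, len, tokens, num_tokens);
  *(int *)out = r; return r < 0 ? 4 : 4 + r * 16`. The callee is used through its contract (`RunSpec`).
-/
import Prog.Jsmn.Fixed.Specs
import Prog.Jsmn.Fixed.RunSpecs
import Prog.Jsmn.State
import Prog.Jsmn.Fixed.CodeFD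
import X86.Derived.Prog.MemWords
import Prog.Jsmn.EncodeAt
import Prog.Jsmn.ResultRange
import Json.Jsmn.Safe

namespace X86
namespace J6
namespace FD
open X86.User (CodeAt RegsKept Span FlagsOK Layout toNat_add_ofNat toNat_ofNat_lt' add_ofNat_add)
open Jsmn JsmnFDBytes

set_option maxRecDepth 100000
set_option maxHeartbeats 4000000
set_option linter.unusedSimpArgs false
set_option linter.unusedVariables false

/-- The fields of `binFD` in a goal (the callee's `RunPre` is stated with them), and the registers of the view at the call. -/
macro "main_lit_f" : tactic => `(tactic| simp (implicitDefEqProofs := false) only [binFD_useRun, binFD_cfg, binFD_image, toksBytes, tokSize_default,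
  JsmnFDBytes.image_bytes_length, X86.User.State.reg_setReg, X86.User.State.reg_setRip, X86.User.State.reg_setFlags, X86.User.State.reg_setMem, reduceCtorEq,
  if_true, if_false])

variable {n : User.Layout} {v0 : User.State} {ret jsA out : Word} {js : List UInt8} {numTokens : Nat} {ts ts' : Tokens} {fuel : Nat} {r : Int} {p' : Parser}

/-- The sign test on `eax`: the pattern of a negative `int`. -/
theorem u32_neg_of {r : Int} {m : Nat} (h : u32 r = m) (hr : -2147483648 ≤ r ∧ r < 2147483648) (hm : 2147483648 ≤ m) : r < 0 := by
  unfold u32 at h; omega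

/-- The sign test on `eax`: the pattern of a non-negative `int` is the number itself. -/
theorem u32_nonneg_of {r : Int} {m : Nat} (h : u32 r = m) (hr : -2147483648 ≤ r ∧ r < 2147483648) (hm : m < 2147483648) :
    0 ≤ r ∧ r.toNat = m := by
  unfold u32 at h; omega

theorem main_reach (hrun : RunSpecFixed binFD n) (hp : MainPreFixed binFD n v0 ret jsA out js numTokens ts)
    (hm : parseFixed binFD.cfg js Parser.init (some ts) numTokens = some (r, p', some ts')) (hrn : 0 ≤ r → r ≤ numTokens) :
    Reach n v0 (fun v => CallPost v0 binFD.useMain [(out.toNat, out.toNat + (4 + binFD.cfg.tokSize * numTokens))] ret v ∧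
      v.reg .rax = UInt64.ofNat (encodeResult binFD.cfg r ts').length ∧ CodeAt v.mem out (encodeResult binFD.cfg r ts')) := by
  have hnt : numTokens < 4294967296 := hp.nlt
  have hrange := parseFixed_range (typed_init hp.nlt) (fun t e => by cases e; exact hp.tlen) hm
  v3_open hp
  j6f_bin
  have hcode := JsmnFD.tjfd_jsmn_main_code hp_call_img
  have hout4 : (out + 4).toNat = out.toNat + 4 := by v3_omega
  v3_walk hcode hp.call.fetch []
  refine Reach.trans (hrun _ 0x100617 jsA (out + 4) js numTokens (some ts) r p' (some ts') ?pre hm) ?_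
  case pre =>
    have htb0 : out + 4 ≠ 0 := fun h => by rw [h] at hout4; have h0 : (0 : UInt64).toNat = 0 := rfl; omega
    have hsz : Config.default.tokSize * ts.length = 16 * numTokens := by rw [tokSize_default, hp_tlen]
    refine ⟨show CallPre n 0x100000 image_bytes 0x1005c9 152 0x100617 _ by v3_callpre hp_call_img hp.call, by v3_regnorm; exact hp_rdi,
      by v3_regnorm; exact hp_rsi, by v3_regnorm, by v3_regnorm; exact hp_rcx, hp_jslt, by v3_frame hp_text,
      ⟨htb0, hp_tlen, by show TokensAt Config.default _ _ _; exact hp_toks.frame (by rw [hsz]; v3_memnorm; v3_eqon) (by rw [hsz]; v3_omega)⟩, hnt,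
      ⟨hp_jsR_lo, hp_jsR_hi, by main_lit_f; exact hp_jsR_img, by main_lit_f; v3_omega⟩,
      Or.inr ⟨by v3_omega, by main_lit_f; v3_omega, by main_lit_f; v3_omega, by main_lit_f; v3_omega⟩, by main_lit_f; v3_omega⟩
  intro v2 hpost
  obtain ⟨hpost1, hrax, htoks2⟩ := hpost
  v3_open hpost1
  have hk := hpost1.kept
  v3_viewnorm at hpost1_rsp hpost1_same hpost1_rip
  have hsp : (v0.reg .rsp - 16).toNat = (v0.reg .rsp).toNat - 16 := by v3_omega
  simp (implicitDefEqProofs := false) only [binFD_useRun, binFD_cfg, toksBytes, tokSize_default] at hpost1_same htoks2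
  rw [hsp, hout4] at hpost1_same
  obtain ⟨htb0, hlen2, htoks2⟩ := htoks2
  have hcode2 : CodeAt v2.mem 0x10060a jsmn_main_bytes := by v3_frame hcodeW
  clear hcodeW
  unfold RetInt at hrax
  have hrbx : v2.reg .rbx = out := by rw [hk.get .rbx rfl]; v3_regnorm
  obtain ⟨m, hmr, hmlt⟩ : ∃ m : Nat, u32 r = m ∧ m < 4294967296 := ⟨u32 r, rfl, u32_lt r⟩
  rw [hmr] at hrax
  v3_walk hcode2 hp.call.fetch [hp_call_retAddr, hp_call_retlt]
  · -- r < 0: return 4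
    have hneg : r < 0 := u32_neg_of hmr hrange (by v3_omega)
    have hlen := encodeResult_length Config.default r ts' (fun h => absurd hneg (by omega))
    rw [if_pos hneg] at hlen
    refine Reach.done ⟨⟨by simp, by simp, calleeSaved_of_six (by v3_regnorm) (by v3_regnorm; rw [hk.get .rbp rfl]; v3_regnorm) (by v3_regnorm; rw [hk.get .r12 rfl]; v3_regnorm)
      (by v3_regnorm; rw [hk.get .r13 rfl]; v3_regnorm) (by v3_regnorm; rw [hk.get .r14 rfl]; v3_regnorm) (by v3_regnorm; rw [hk.get .r15 rfl]; v3_regnorm), by v3_same⟩, ?_, ?_⟩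
    · v3_regnorm; rw [hlen]; rfl
    · v3_memnorm
      have hsz2 : Config.default.tokSize * ts'.length = 16 * numTokens := by rw [tokSize_default, hlen2]
      refine encodeResult_at ?_ (htoks2.frame (by rw [hsz2]; v3_eqon) (by rw [hsz2]; v3_omega)) (fun h => absurd hneg (by omega))
      rw [hmr]
      v3_read
  · -- 0 ≤ r: return 4 + r * 16
    have hm31 : m < 2147483648 := by v3_omega
    obtain ⟨hr0, hrm⟩ := u32_nonneg_of hmr hrange hm31
    have hnn : ¬ r < 0 := Int.not_lt.mpr hr0
    have hle : r.toNat ≤ ts'.length := by have := hrn hr0; rw [hlen2]; exact Int.toNat_le.mpr this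
    have hlen := encodeResult_length Config.default r ts' (fun _ => hle)
    rw [if_neg hnn, tokSize_default, hrm] at hlen
    have hsext := Word.sext32_ofNat_of_lt m hm31
    have hshl := shl4_ofNat m (by omega)
    refine Reach.done ⟨⟨by simp, by simp, calleeSaved_of_six (by v3_regnorm) (by v3_regnorm; rw [hk.get .rbp rfl]; v3_regnorm) (by v3_regnorm; rw [hk.get .r12 rfl]; v3_regnorm)
      (by v3_regnorm; rw [hk.get .r13 rfl]; v3_regnorm) (by v3_regnorm; rw [hk.get .r14 rfl]; v3_regnorm) (by v3_regnorm; rw [hk.get .r15 rfl]; v3_regnorm), by v3_same⟩, ?_, ?_⟩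
    · v3_regnorm; rw [hlen, hsext, hshl]
      apply UInt64.toNat_inj.mp
      v3_omega
    · v3_memnorm
      have hsz2 : Config.default.tokSize * ts'.length = 16 * numTokens := by rw [tokSize_default, hlen2]
      refine encodeResult_at ?_ (htoks2.frame (by rw [hsz2]; v3_eqon) (by rw [hsz2]; v3_omega)) (fun _ => hle)
      rw [hmr]
      v3_read

/-- **`jsmn_main` of jsmn_d.bin leaves `encodeResult r tokens` at `out` and returns its length.** -/
theorem main_spec (hrun : RunSpecFixed binFD n) : MainSpecFixed binFD n :=
  fun _ _ _ _ _ _ _ _ _ _ hp hm hrn => main_reach hrun hp hm hrn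

end FD
end J6
end X86
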